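-- pv_equiv track=rewrite | github.com/HaneenKl/Bachelor-Project | semigroup.py | sort_elements
-- ===== SOURCE A (Python) =====
-- def mul(f, g):
--     return tuple(g[f[q]] for q in range(len(f)))
--
-- def sort_elements(reps):
--     elements = list(reps.keys())
--
--     # find sink element
--     sink = None
--     for z in elements:
--         if all(mul(z, x) == z and mul(x, z) == z for x in elements):
--             sink = z
--             break
--
--     def sort_key(e):
--         if reps[e] == "":
--             return 0, ""
--         if e == sink:
--             return 2, ""
--         return 1, reps[e]
--
--     return sorted(elements, key=sort_key)
-- ===== SOURCE B (Python) =====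
-- def mul(f, g):
--     return tuple(g[f[q]] for q in range(len(f)))
--
--
-- def sort_elements(reps):
--     elements = list(reps.keys())
--
--     # find sink element
--     sink = None
--     for z in elements:
--         if all(mul(z, x) == z and mul(x, z) == z for x in elements):
--             sink = z
--             break
--
--     # single pass: bucket every element, keeping iteration order inside each bucket
--     empties, normals, sinks = [], [], []
--     for e in elements:
--         if reps[e] == "":
--             empties.append(e)
--         elif e == sink:
--             sinks.append(e)
--         else:
--             normals.append(e)
--
--     normals.sort(key=lambda e: reps[e])
--     return empties + normals + sinks
-- ===== Notes on version B (the rewrite author's own statement) =====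
-- stated objective: alternative
-- what changed: Replaces the single sorted() call with a 3-tuple key by one bucketing pass into empties/normals/sinks lists followed by a stable sort of the normals bucket alone, concatenating the three buckets; the sink search is unchanged.
import Mathlib
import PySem

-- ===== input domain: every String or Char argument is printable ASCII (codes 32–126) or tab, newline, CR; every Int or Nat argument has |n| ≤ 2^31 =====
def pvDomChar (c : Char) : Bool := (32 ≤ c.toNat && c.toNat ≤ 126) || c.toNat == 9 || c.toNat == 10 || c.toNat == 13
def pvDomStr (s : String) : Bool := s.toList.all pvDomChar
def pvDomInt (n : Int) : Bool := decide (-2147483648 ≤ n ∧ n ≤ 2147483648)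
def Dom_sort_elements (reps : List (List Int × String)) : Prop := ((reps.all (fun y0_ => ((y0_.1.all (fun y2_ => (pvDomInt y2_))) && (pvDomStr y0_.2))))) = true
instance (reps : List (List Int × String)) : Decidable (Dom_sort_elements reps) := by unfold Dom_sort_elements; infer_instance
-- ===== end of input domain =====

-- B replaces the one sorted() call with a tuple key by a single bucketing pass (empties / normals / sinks)
-- plus a stable sort of the normals bucket only; the sink search is identical in both programs.

-- ===== PORT A =====
-- mul(f, g) = tuple(g[f[q]] for q in range(len(f))); total via pyGetD, exact under Pre_ (all indices in range)
def pvMul (f g : List Int) : List Int :=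
  (PySem.List.pyRange 0 (PySem.List.len f) 1).map
    (fun q => PySem.List.pyGetD g (PySem.List.pyGetD f q 0) 0)

-- the 'for z in elements: … break' sink search (first z absorbing on both sides, else None)
def pvFindSink (elements : List (List Int)) : Option (List Int) :=
  elements.find? (fun z => elements.all (fun x => pvMul z x == z && pvMul x z == z))

def sort_elements (reps : List (List Int × String)) : List (List Int) :=
  let d := PySem.Dict.ofList reps
  let elements := d.keys
  let sink := pvFindSink elements
  PySem.List.sorted2 elements
    (fun e => if d.getD e "" = "" then (0 : Int) else if sink = some e then 2 else 1)
    (fun e => if d.getD e "" = "" then "" else if sink = some e then "" else d.getD e "")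
    false

-- ===== PORT B =====
def sort_elements_alt (reps : List (List Int × String)) : List (List Int) :=
  let d := PySem.Dict.ofList reps
  let elements := d.keys
  let sink := pvFindSink elements
  let t := elements.foldl
    (fun (acc : List (List Int) × List (List Int) × List (List Int)) e =>
      if d.getD e "" = "" then (acc.1 ++ [e], acc.2.1, acc.2.2)
      else if sink = some e then (acc.1, acc.2.1, acc.2.2 ++ [e])
      else (acc.1, acc.2.1 ++ [e], acc.2.2))
    ([], [], [])
  t.1 ++ PySem.List.sorted t.2.1 (fun e => d.getD e "") false ++ t.2.2

-- ===== PRECONDITION & SPEC =====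
-- A raises IndexError when some mul(f, g) indexes g out of range; Pre_ requires every value of every key to be
-- a valid (possibly negative) Python index into every key. This is slightly stronger than A's exact raising set
-- (short-circuiting of 'all'/'and' and the early break can skip a bad lookup), so Pre_ excludes a few inputs on
-- which A still returns; see the cite in claim.json.
def Pre_sort_elements (reps : List (List Int × String)) : Prop :=
  ∀ p ∈ reps, ∀ q ∈ reps, ∀ v ∈ p.1, PySem.Raise.InRange q.1.length v
instance (reps : List (List Int × String)) : Decidable (Pre_sort_elements reps) := by
  unfold Pre_sort_elements; infer_instance

def pvWitness_sort_elements : (List (List Int × String)) := [([0, 0], "a"), ([1, 0], "b"), ([1, 1], "")]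

def Spec_sort_elements (reps : List (List Int × String)) (out : List (List Int)) : Prop := out = sort_elements_alt reps
instance (reps : List (List Int × String)) (out : List (List Int)) : Decidable (Spec_sort_elements reps out) := by unfold Spec_sort_elements; infer_instance

-- ===== CLAIM (what is proved, stated in full; the proofs are below) =====
def Claim_equal_sort_elements : Prop := ∀ (reps : List (List Int × String)), Dom_sort_elements reps → Pre_sort_elements reps → Spec_sort_elements reps (sort_elements reps)

-- ===== LEMMAS AND PROOFS =====

-- inserting x past a prefix it is not 'before'
theorem pv_insertBy_front {α : Type} (before : α → α → Bool) (x : α) (pre rest : List α)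
    (h : ∀ y ∈ pre, before x y = false) :
    PySem.List.insertBy before x (pre ++ rest) = pre ++ PySem.List.insertBy before x rest := by
  induction pre with
  | nil => simp
  | cons y ys ih =>
      simp [PySem.List.insertBy, h y (by simp), ih (fun z hz => h z (by simp [hz]))]

-- inserting x in front of a list it is 'before' everywhere
theorem pv_insertBy_all_before {α : Type} (before : α → α → Bool) (x : α) (ys : List α)
    (h : ∀ y ∈ ys, before x y = true) :
    PySem.List.insertBy before x ys = x :: ys := by
  cases ys with
  | nil => rfl
  | cons y t => simp [PySem.List.insertBy, h y (by simp)]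

-- inserting into mid ++ post when the comparator agrees with before' on mid and always fires on post
theorem pv_insertBy_mid {α : Type} (before before' : α → α → Bool) (x : α) (mid post : List α)
    (hm : ∀ y ∈ mid, before x y = before' x y) (hp : ∀ y ∈ post, before x y = true) :
    PySem.List.insertBy before x (mid ++ post) = PySem.List.insertBy before' x mid ++ post := by
  induction mid with
  | nil => simp [pv_insertBy_all_before before x post hp, PySem.List.insertBy]
  | cons y ys ih =>
      by_cases h : before' x y = true
      · simp [PySem.List.insertBy, hm y (by simp), h]
      · simp [PySem.List.insertBy, hm y (by simp), h,
          ih (fun z hz => hm z (by simp [hz]))]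

-- the bucketing theorem: a stable insertion sort under a 3-valued tag splits into the three buckets
theorem pv_bucket_sort {α : Type} (lt lt2 : α → α → Bool) (tag : α → Int)
    (htag : ∀ e : α, tag e = 0 ∨ tag e = 1 ∨ tag e = 2)
    (h00 : ∀ x y, tag x = 0 → tag y = 0 → lt x y = false)
    (h0hi : ∀ x y, tag x = 0 → tag y ≠ 0 → lt x y = true)
    (h2 : ∀ x y, tag x = 2 → lt x y = false)
    (h10 : ∀ x y, tag x = 1 → tag y = 0 → lt x y = false)
    (h11 : ∀ x y, tag x = 1 → tag y = 1 → lt x y = lt2 x y)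
    (h12 : ∀ x y, tag x = 1 → tag y = 2 → lt x y = true) :
    ∀ (es a0 s1 a2 : List α), (∀ y ∈ a0, tag y = 0) → (∀ y ∈ s1, tag y = 1) → (∀ y ∈ a2, tag y = 2) →
    es.foldl (fun acc x => PySem.List.insertBy lt x acc) (a0 ++ s1 ++ a2)
      = (a0 ++ es.filter (fun e => tag e = 0))
        ++ ((es.filter (fun e => tag e = 1)).foldl (fun acc x => PySem.List.insertBy lt2 x acc) s1)
        ++ (a2 ++ es.filter (fun e => tag e = 2)) := by
  intro es
  induction es with
  | nil => intro a0 s1 a2 _ _ _; simp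
  | cons x es ih =>
      intro a0 s1 a2 h0 h1 hA2
      rcases htag x with hx | hx | hx
      · -- tag x = 0 : x goes to the end of the a0 block
        have step : PySem.List.insertBy lt x (a0 ++ s1 ++ a2)
            = (a0 ++ [x]) ++ s1 ++ a2 := by
          rw [List.append_assoc, pv_insertBy_front lt x a0 (s1 ++ a2)
            (fun y hy => h00 x y hx (h0 y hy))]
          rw [pv_insertBy_all_before lt x (s1 ++ a2) (fun y hy => by
            rcases List.mem_append.mp hy with hy | hy
            · exact h0hi x y hx (by rw [h1 y hy]; decide)
            · exact h0hi x y hx (by rw [hA2 y hy]; decide))]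
          simp
        simp only [List.foldl_cons, step]
        rw [ih (a0 ++ [x]) s1 a2
          (fun y hy => by rcases List.mem_append.mp hy with hy | hy
                          · exact h0 y hy
                          · simp at hy; subst hy; exact hx) h1 hA2]
        simp [hx]
      · -- tag x = 1 : x is inserted into the s1 block
        have step : PySem.List.insertBy lt x (a0 ++ s1 ++ a2)
            = a0 ++ PySem.List.insertBy lt2 x s1 ++ a2 := by
          rw [List.append_assoc, pv_insertBy_front lt x a0 (s1 ++ a2)
            (fun y hy => h10 x y hx (h0 y hy))]
          rw [pv_insertBy_mid lt lt2 x s1 a2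
            (fun y hy => h11 x y hx (h1 y hy)) (fun y hy => h12 x y hx (hA2 y hy))]
          simp
        simp only [List.foldl_cons, step]
        rw [ih a0 (PySem.List.insertBy lt2 x s1) a2 h0
          (fun y hy => by
            rcases (PySem.List.mem_insertBy lt2 x y s1).mp hy with hy | hy
            · subst hy; exact hx
            · exact h1 y hy) hA2]
        simp [hx]
      · -- tag x = 2 : x goes to the very end
        have step : PySem.List.insertBy lt x (a0 ++ s1 ++ a2)
            = a0 ++ s1 ++ (a2 ++ [x]) := by
          rw [PySem.List.insertBy_of_forall_not_before _ _ _ (fun y _ => h2 x y hx)]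
          simp
        simp only [List.foldl_cons, step]
        rw [ih a0 s1 (a2 ++ [x]) h0 h1
          (fun y hy => by rcases List.mem_append.mp hy with hy | hy
                          · exact hA2 y hy
                          · simp at hy; subst hy; exact hx)]
        simp [hx]

-- B's bucketing loop produces exactly the three filters
theorem pv_triple_foldl {α : Type} (p0 p2 : α → Prop) [DecidablePred p0] [DecidablePred p2] :
    ∀ (es : List α) (a b c : List α),
    es.foldl (fun (acc : List α × List α × List α) e =>
        if p0 e then (acc.1 ++ [e], acc.2.1, acc.2.2)
        else if p2 e then (acc.1, acc.2.1, acc.2.2 ++ [e])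
        else (acc.1, acc.2.1 ++ [e], acc.2.2)) (a, b, c)
      = (a ++ es.filter (fun e => decide (p0 e)),
         b ++ es.filter (fun e => decide (¬ p0 e ∧ ¬ p2 e)),
         c ++ es.filter (fun e => decide (¬ p0 e ∧ p2 e))) := by
  intro es
  induction es with
  | nil => intro a b c; simp
  | cons x es ih =>
      intro a b c
      by_cases h0 : p0 x
      · simp [h0, ih]
      · by_cases h2 : p2 x
        · simp [h0, h2, ih]
        · simp [h0, h2, ih]

-- the whole equivalence, stated over an arbitrary dict and sink so both ports reduce to it
theorem pv_main (d : PySem.Dict (List Int) String) (sink : Option (List Int))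
    (elements : List (List Int)) :
    PySem.List.sorted2 elements
      (fun e => if d.getD e "" = "" then (0 : Int) else if sink = some e then 2 else 1)
      (fun e => if d.getD e "" = "" then "" else if sink = some e then "" else d.getD e "")
      false
    = (let t := elements.foldl
        (fun (acc : List (List Int) × List (List Int) × List (List Int)) e =>
          if d.getD e "" = "" then (acc.1 ++ [e], acc.2.1, acc.2.2)
          else if sink = some e then (acc.1, acc.2.1, acc.2.2 ++ [e])
          else (acc.1, acc.2.1 ++ [e], acc.2.2))
        ([], [], [])
       t.1 ++ PySem.List.sorted t.2.1 (fun e => d.getD e "") false ++ t.2.2) := by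
  have hbuckets := pv_triple_foldl (α := List Int)
    (fun e => d.getD e "" = "") (fun e => sink = some e) elements [] [] []
  have h := pv_bucket_sort
    (lt := fun a b =>
      decide ((if d.getD a "" = "" then (0 : Int) else if sink = some a then 2 else 1)
        < (if d.getD b "" = "" then (0 : Int) else if sink = some b then 2 else 1)) ||
      (!decide ((if d.getD b "" = "" then (0 : Int) else if sink = some b then 2 else 1)
        < (if d.getD a "" = "" then (0 : Int) else if sink = some a then 2 else 1)) &&
        decide ((if d.getD a "" = "" then "" else if sink = some a then "" else d.getD a "")
          < (if d.getD b "" = "" then "" else if sink = some b then "" else d.getD b ""))))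
    (lt2 := fun a b => decide (d.getD a "" < d.getD b ""))
    (tag := fun e => if d.getD e "" = "" then (0 : Int) else if sink = some e then 2 else 1)
    (by intro e; dsimp only; split_ifs <;> simp)
    (by intro x y hx hy; dsimp only at hx hy ⊢
        split_ifs at hx hy ⊢ <;> simp_all)
    (by intro x y hx hy; dsimp only at hx hy ⊢
        split_ifs at hx hy ⊢ <;> simp_all)
    (by intro x y hx; dsimp only at hx ⊢
        split_ifs at hx ⊢ <;> simp_all)
    (by intro x y hx hy; dsimp only at hx hy ⊢
        split_ifs at hx hy ⊢ <;> simp_all)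
    (by intro x y hx hy; dsimp only at hx hy ⊢
        split_ifs at hx hy ⊢ <;> simp_all)
    (by intro x y hx hy; dsimp only at hx hy ⊢
        split_ifs at hx hy ⊢ <;> simp_all)
    elements [] [] [] (by simp) (by simp) (by simp)
  simp only [List.nil_append, List.append_nil] at h hbuckets
  show List.foldl _ [] elements = _
  simp only [hbuckets]
  simp only [PySem.List.sorted, Bool.false_eq_true, if_false]
  rw [h]
  have e0 : List.filter (fun e => decide ((if d.getD e "" = "" then (0:Int) else if sink = some e then 2 else 1) = 0)) elements
      = List.filter (fun e => decide (d.getD e "" = "")) elements :=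
    List.filter_congr (fun e _ => by simp only [decide_eq_decide]; split_ifs <;> simp_all)
  have e1 : List.filter (fun e => decide ((if d.getD e "" = "" then (0:Int) else if sink = some e then 2 else 1) = 1)) elements
      = List.filter (fun e => decide (¬ d.getD e "" = "" ∧ ¬ sink = some e)) elements :=
    List.filter_congr (fun e _ => by simp only [decide_eq_decide]; split_ifs <;> simp_all)
  have e2 : List.filter (fun e => decide ((if d.getD e "" = "" then (0:Int) else if sink = some e then 2 else 1) = 2)) elements
      = List.filter (fun e => decide (¬ d.getD e "" = "" ∧ sink = some e)) elements :=
    List.filter_congr (fun e _ => by simp only [decide_eq_decide]; split_ifs <;> simp_all)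
  rw [e0, e1, e2]

-- ===== VERDICT (by name: the statement is the Claim_ definition above) =====
theorem sort_elements_spec : Claim_equal_sort_elements := by
  intro reps _ _
  unfold Spec_sort_elements sort_elements sort_elements_alt
  exact pv_main (PySem.Dict.ofList reps) (pvFindSink (PySem.Dict.ofList reps).keys)
    (PySem.Dict.ofList reps).keys
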